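-- pv_equiv track=rewrite | github.com/bester2112/SAT-Solving-basiertes-Object-Packing | Hilfsprogramme/benchmark-creator-graphical/main.py | find_bounds
-- ===== SOURCE A (Python) =====
-- def find_bounds(matrix):
--     min_x, max_x, min_y, max_y = len(matrix[0]), 0, len(matrix), 0
--
--     for y in range(len(matrix)):
--         for x in range(len(matrix[y])):
--             if matrix[x][y]:
--                 min_x = min(min_x, x)
--                 max_x = max(max_x, x)
--                 min_y = min(min_y, y)
--                 max_y = max(max_y, y)
--
--     return min_x, max_x, min_y, max_y
-- ===== SOURCE B (Python) =====
-- def find_bounds(matrix):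
--     pts = [(x, y) for y in range(len(matrix)) for x in range(len(matrix[y])) if matrix[x][y]]
--     min_x = min([len(matrix[0])] + [p[0] for p in pts])
--     max_x = max([0] + [p[0] for p in pts])
--     min_y = min([len(matrix)] + [p[1] for p in pts])
--     max_y = max([0] + [p[1] for p in pts])
--     return min_x, max_x, min_y, max_y
-- ===== Notes on version B (the rewrite author's own statement) =====
-- stated objective: simpler
-- what changed: Replaces the fused four-variable min/max loop with a build-then-reduce decomposition: one comprehension collects the truthy cell coordinates (same transposed access), then each bound is a separate seeded reduction.
import Mathlib
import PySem

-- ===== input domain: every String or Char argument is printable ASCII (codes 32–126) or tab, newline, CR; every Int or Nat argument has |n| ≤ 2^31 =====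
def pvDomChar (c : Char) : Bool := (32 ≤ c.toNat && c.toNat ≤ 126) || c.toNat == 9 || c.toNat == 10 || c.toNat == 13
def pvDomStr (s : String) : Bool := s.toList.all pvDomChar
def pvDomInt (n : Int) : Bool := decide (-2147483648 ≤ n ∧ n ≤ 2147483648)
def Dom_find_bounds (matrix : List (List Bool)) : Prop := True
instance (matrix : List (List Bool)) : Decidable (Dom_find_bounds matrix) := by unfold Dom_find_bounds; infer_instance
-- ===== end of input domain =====

-- B replaces A's fused four-variable min/max loop by a build-then-reduce decomposition
-- (collect the truthy cell coordinates once, then four independent seeded reductions); simpler, same cost.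

-- ===== PORT A =====
-- A's nested loops with the single 4-tuple state (min_x, max_x, min_y, max_y).
-- Indexing uses getD; under Pre_find_bounds every index A evaluates is in range, so this is exact.
def find_bounds (matrix : List (List Bool)) : Int × Int × Int × Int :=
  let init : Int × Int × Int × Int := (((matrix.headD []).length : Int), 0, (matrix.length : Int), 0)
  (List.range matrix.length).foldl (fun st y =>
    (List.range (matrix.getD y []).length).foldl (fun (st : Int × Int × Int × Int) x =>
      if (matrix.getD x []).getD y false then
        (min st.1 (x : Int), max st.2.1 (x : Int), min st.2.2.1 (y : Int), max st.2.2.2 (y : Int))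
      else st) st) init

-- ===== PORT B =====
-- B's comprehension (same transposed access and ranges), then min/max of each seeded list,
-- with Python's min/max over a nonempty list ported as a left fold from the seed.
def find_bounds_alt (matrix : List (List Bool)) : Int × Int × Int × Int :=
  let pts : List (Int × Int) := (List.range matrix.length).flatMap (fun y =>
    (List.range (matrix.getD y []).length).filterMap (fun x =>
      if (matrix.getD x []).getD y false then some ((x : Int), (y : Int)) else none))
  ((pts.map Prod.fst).foldl min ((matrix.headD []).length : Int),
   (pts.map Prod.fst).foldl max 0,
   (pts.map Prod.snd).foldl min (matrix.length : Int),
   (pts.map Prod.snd).foldl max 0)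

-- ===== PRECONDITION & SPEC =====
-- Pre_ holds exactly when the Python A returns: matrix nonempty (len(matrix[0])) and every
-- transposed access matrix[x][y] that the loops perform is in range (otherwise IndexError).
def Pre_find_bounds (matrix : List (List Bool)) : Prop :=
  matrix ≠ [] ∧ ∀ y, y < matrix.length → ∀ x, x < (matrix.getD y []).length →
    x < matrix.length ∧ y < (matrix.getD x []).length
instance (matrix : List (List Bool)) : Decidable (Pre_find_bounds matrix) := by unfold Pre_find_bounds; infer_instance

def pvWitness_find_bounds : List (List Bool) := [[true, false], [false, true]]

def Spec_find_bounds (matrix : List (List Bool)) (out : Int × Int × Int × Int) : Prop := out = find_bounds_alt matrix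
instance (matrix : List (List Bool)) (out : Int × Int × Int × Int) : Decidable (Spec_find_bounds matrix out) := by unfold Spec_find_bounds; infer_instance

-- ===== CLAIM (what is proved, stated in full; the proofs are below) =====
def Claim_equal_find_bounds : Prop := ∀ (matrix : List (List Bool)), Dom_find_bounds matrix → Pre_find_bounds matrix → Spec_find_bounds matrix (find_bounds matrix)

-- ===== LEMMAS AND PROOFS =====

-- filterMap of a guarded embedding folds like the guarded loop body.
theorem foldl_if_filterMap {β σ : Type} (l : List Nat) (p : Nat → Bool) (emb : Nat → β)
    (g : σ → β → σ) (st : σ) :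
    (l.filterMap (fun x => if p x then some (emb x) else none)).foldl g st
      = l.foldl (fun st x => if p x then g st (emb x) else st) st := by
  induction l generalizing st with
  | nil => rfl
  | cons h t ih => by_cases hp : p h <;> simp [hp, ih]

-- the fused 4-tuple fold splits into four componentwise folds.
theorem foldl_bounds_split (pts : List (Int × Int)) (a b c d : Int) :
    pts.foldl (fun (st : Int × Int × Int × Int) p =>
        (min st.1 p.1, max st.2.1 p.1, min st.2.2.1 p.2, max st.2.2.2 p.2)) (a, b, c, d)
      = ((pts.map Prod.fst).foldl min a, (pts.map Prod.fst).foldl max b,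
         (pts.map Prod.snd).foldl min c, (pts.map Prod.snd).foldl max d) := by
  induction pts generalizing a b c d with
  | nil => rfl
  | cons h t ih => simp [List.foldl_cons, ih]

theorem find_bounds_eq_alt (matrix : List (List Bool)) :
    find_bounds matrix = find_bounds_alt matrix := by
  unfold find_bounds find_bounds_alt
  rw [← foldl_bounds_split, List.foldl_flatMap]
  simp only [foldl_if_filterMap]

-- ===== VERDICT (by name: the statement is the Claim_ definition above) =====
theorem find_bounds_spec : Claim_equal_find_bounds := by
  intro matrix _ _
  exact find_bounds_eq_alt matrix
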